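-- pv_equiv track=rewrite | github.com/crakkerjak/practice | max_subarray.py | max_num_made_of_repeats
-- ===== SOURCE A (Python) =====
-- def max_num_made_of_repeats(n):
--     max_so_far = 0
--     none_found = True
--     current = None
--     decimal = n % 10
--     n = int(n / 10)
--     while n >= 1:
--         last = decimal
--         decimal = n % 10
--         n = int(n / 10)
--         if decimal == last:
--             if not current:
--                 current = str(decimal)
--             none_found = False
--             current += str(decimal)
--         else:
--             current = None
--         if current: max_so_far = max(max_so_far, int(current))
--
--     if none_found: max_so_far = None
--     return max_so_far
-- ===== SOURCE B (Python) =====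
-- def max_num_made_of_repeats(n):
--     # build the digit list, least-significant first (same arithmetic as the loop in A)
--     digits = [n % 10]
--     m = int(n / 10)
--     while m >= 1:
--         digits.append(m % 10)
--         m = int(m / 10)
--     # run-length encode consecutive equal digits
--     runs = []
--     for d in digits:
--         if runs and runs[-1][0] == d:
--             runs[-1][1] += 1
--         else:
--             runs.append([d, 1])
--     # best candidate over runs of length >= 2: the repdigit d * repunit(length)
--     best = None
--     for d, length in runs:
--         if length >= 2:
--             candidate = d * (10 ** length - 1) // 9
--             best = candidate if best is None else max(best, candidate)
--     return best
-- ===== Notes on version B (the rewrite author's own statement) =====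
-- stated objective: alternative
-- what changed: A tracks the current run inline in one loop, growing a digit string and re-parsing it with int() for a running max; B makes three separate passes - build the digit list, run-length encode it, then take the max of the repdigit value d*(10**len-1)//9 over runs of length >= 2 - with no string building.
import Mathlib
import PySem

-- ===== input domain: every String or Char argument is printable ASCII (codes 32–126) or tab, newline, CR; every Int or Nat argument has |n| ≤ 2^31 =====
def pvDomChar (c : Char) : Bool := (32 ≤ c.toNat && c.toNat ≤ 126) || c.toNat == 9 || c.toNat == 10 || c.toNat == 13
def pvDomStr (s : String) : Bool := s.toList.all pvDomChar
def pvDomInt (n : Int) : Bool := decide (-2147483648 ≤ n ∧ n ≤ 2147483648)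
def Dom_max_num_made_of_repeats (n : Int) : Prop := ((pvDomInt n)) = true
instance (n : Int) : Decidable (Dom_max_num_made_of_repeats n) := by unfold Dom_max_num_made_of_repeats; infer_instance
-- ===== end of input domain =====

-- B replaces A's inline run/string tracking by three plain passes (digit list, run-length encoding,
-- max over repdigit candidates computed arithmetically); objective: alternative decomposition, not speed.

-- termination helper for the `while n >= 1: n = int(n / 10)` loops (cited by name in decreasing_by)
theorem pv_tdiv10_lt (n : Int) (h : 1 ≤ n) : (PySem.Int.truncdiv n 10).toNat < n.toNat := by
  have : PySem.Int.truncdiv n 10 = n / 10 := Int.tdiv_eq_ediv_of_nonneg (by omega)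
  rw [this]; omega

-- ===== PORT A =====
def aLoop (n decimal maxSoFar : Int) (noneFound : Bool) (current : Option (List Char)) : Int × Bool :=
  if _h : 1 ≤ n then
    let last := decimal
    let dec2 := PySem.Int.mod n 10          -- decimal = n % 10
    let n2 := PySem.Int.truncdiv n 10       -- n = int(n / 10)
    let (cur2, nf2) :=
      if dec2 == last then
        -- `if not current:` — current is None or a nonempty digit string (always truthy)
        let c := match current with
          | none => PySem.Int.toChars dec2  -- current = str(decimal)
          | some s => s
        (some (c ++ PySem.Int.toChars dec2), false)   -- current += str(decimal); none_found = False
      else (none, noneFound)                           -- current = None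
    let ms2 := match cur2 with              -- `if current: max_so_far = max(max_so_far, int(current))`
      | some s => max maxSoFar ((PySem.Int.ofChars? s).getD 0)  -- int(current): s is pure digits, never a ValueError
      | none => maxSoFar
    aLoop n2 dec2 ms2 nf2 cur2
  else (maxSoFar, noneFound)
termination_by n.toNat
decreasing_by exact pv_tdiv10_lt n _h

def max_num_made_of_repeats (n : Int) : Option Int :=
  let decimal := PySem.Int.mod n 10
  let n2 := PySem.Int.truncdiv n 10
  let r := aLoop n2 decimal 0 true none
  if r.2 then none else some r.1            -- `if none_found: max_so_far = None`

-- ===== PORT B =====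
def digitsLoopB (m : Int) (acc : List Int) : List Int :=
  if _h : 1 ≤ m then digitsLoopB (PySem.Int.truncdiv m 10) (acc ++ [PySem.Int.mod m 10]) else acc
termination_by m.toNat
decreasing_by exact pv_tdiv10_lt m _h

def rleLoop (ds : List Int) (runs : List (Int × Int)) : List (Int × Int) :=
  match ds with
  | [] => runs
  | d :: rest =>
      match runs.getLast? with               -- `if runs and runs[-1][0] == d`
      | some r => if r.1 == d then rleLoop rest (runs.dropLast ++ [(r.1, r.2 + 1)])  -- runs[-1][1] += 1
                  else rleLoop rest (runs ++ [(d, 1)])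
      | none => rleLoop rest ([] ++ [(d, 1)])

def bestLoop (runs : List (Int × Int)) (best : Option Int) : Option Int :=
  match runs with
  | [] => best
  | (d, len) :: rest =>
      let best2 := if 2 ≤ len then
          let cand := PySem.Int.floordiv (d * (10 ^ len.toNat - 1)) 9   -- d * (10 ** length - 1) // 9
          some (match best with | none => cand | some b => max b cand)
        else best
      bestLoop rest best2

def max_num_made_of_repeats_alt (n : Int) : Option Int :=
  let digits := digitsLoopB (PySem.Int.truncdiv n 10) [PySem.Int.mod n 10]
  bestLoop (rleLoop digits []) none

-- ===== PRECONDITION & SPEC =====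
def Spec_max_num_made_of_repeats (n : Int) (out : Option Int) : Prop := out = max_num_made_of_repeats_alt n
instance (n : Int) (out : Option Int) : Decidable (Spec_max_num_made_of_repeats n out) := by unfold Spec_max_num_made_of_repeats; infer_instance

-- ===== CLAIM (what is proved, stated in full; the proofs are below) =====
def Claim_equal_max_num_made_of_repeats : Prop := ∀ (n : Int), Dom_max_num_made_of_repeats n → Spec_max_num_made_of_repeats n (max_num_made_of_repeats n)

-- ===== LEMMAS AND PROOFS =====

-- the digit list (least-significant first) that both loops walk
def digitsFrom (n : Int) : List Int :=
  if _h : 1 ≤ n then PySem.Int.mod n 10 :: digitsFrom (PySem.Int.truncdiv n 10) else []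
termination_by n.toNat
decreasing_by exact pv_tdiv10_lt n _h

def repVal (d : Int) (L : Nat) : Int := PySem.Int.floordiv (d * (10 ^ L - 1)) 9

def upd : Option Int → Int → Option Int
  | none, v => some v
  | some b, v => some (max b v)

-- common reference computation: walk the digits keeping (previous digit, run length, best candidate)
def goSpec : List Int → Int → Nat → Option Int → Option Int
  | [], _, _, b => b
  | d :: rest, last, L, b =>
      if d = last then goSpec rest d (L + 1) (upd b (repVal d (L + 1)))
      else goSpec rest d 1 b

def dchar (d : Int) : Char := Char.ofNat (48 + d.toNat)

theorem toChars_digit (d : Int) (h0 : 0 ≤ d) (h1 : d < 10) :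
    PySem.Int.toChars d = [dchar d] := by
  interval_cases d <;> decide

theorem ofChars_rep (d : Int) (h0 : 0 ≤ d) (h1 : d < 10) (L : Nat) (hL : 2 ≤ L) (hU : L ≤ 11) :
    PySem.Int.ofChars? (List.replicate L (dchar d)) = some (repVal d L) := by
  interval_cases d <;> interval_cases L <;> decide

theorem nine_dvd_pow (L : Nat) : (9 : Int) ∣ 10 ^ L - 1 := by
  induction L with
  | zero => decide
  | succ k ih =>
    have : (10 : Int) ^ (k + 1) - 1 = 10 * (10 ^ k - 1) + 9 := by ring
    rw [this]; exact dvd_add (Dvd.dvd.mul_left ih 10) ⟨1, by ring⟩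

theorem repVal_eq (d : Int) (L : Nat) : ∀ q : Int, 10 ^ L - 1 = 9 * q → repVal d L = d * q := by
  intro q hq
  unfold repVal
  rw [PySem.Int.floordiv_eq_ediv_of_pos (by norm_num), hq, show d * (9 * q) = 9 * (d * q) by ring,
    Int.mul_ediv_cancel_left _ (by norm_num)]

theorem repVal_nonneg (d : Int) (h0 : 0 ≤ d) (L : Nat) : 0 ≤ repVal d L := by
  obtain ⟨q, hq⟩ := nine_dvd_pow L
  have h1 : (1 : Int) ≤ 10 ^ L := one_le_pow₀ (by norm_num)
  have hq0 : 0 ≤ q := by nlinarith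
  rw [repVal_eq d L q hq]
  positivity

theorem repVal_mono (d : Int) (h0 : 0 ≤ d) (L : Nat) : repVal d L ≤ repVal d (L + 1) := by
  obtain ⟨q, hq⟩ := nine_dvd_pow L
  have h1 : (1 : Int) ≤ 10 ^ L := one_le_pow₀ (by norm_num)
  have hq0 : 0 ≤ q := by nlinarith
  have hq' : (10 : Int) ^ (L + 1) - 1 = 9 * (10 * q + 1) := by rw [pow_succ]; nlinarith
  rw [repVal_eq d L q hq, repVal_eq d (L + 1) _ hq']
  nlinarith

theorem upd_absorb (b : Option Int) (v w : Int) (h : v ≤ w) : upd (upd b v) w = upd b w := by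
  cases b <;> (simp [upd]; omega)

theorem upd_getD (b : Option Int) (v : Int) (hv : 0 ≤ v) : (upd b v).getD 0 = max (b.getD 0) v := by
  cases b
  · simp [upd]; omega
  · simp [upd]

theorem upd_isSome (b : Option Int) (v : Int) : (upd b v).isNone = false := by
  cases b <;> simp [upd]

-- digitsFrom facts
theorem digitsFrom_mem (n : Int) : ∀ d ∈ digitsFrom n, 0 ≤ d ∧ d < 10 := by
  induction n using digitsFrom.induct with
  | case1 n h ih =>
    rw [digitsFrom]; simp only [h, dif_pos]
    intro d hd
    rcases List.mem_cons.mp hd with h1 | h1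
    · subst h1
      exact ⟨PySem.Int.mod_nonneg _ (by norm_num), PySem.Int.mod_lt _ (by norm_num)⟩
    · exact ih d h1
  | case2 n h =>
    rw [digitsFrom]; simp [h]

theorem digitsFrom_len : ∀ (k : Nat) (n : Int), n < 10 ^ k → (digitsFrom n).length ≤ k := by
  intro k
  induction k with
  | zero => intro n h; rw [digitsFrom]; simp at h ⊢; omega
  | succ k ih =>
    intro n h
    rw [digitsFrom]
    by_cases h1 : 1 ≤ n
    · simp only [h1, dif_pos, List.length_cons]
      have hp : (1 : Int) ≤ 10 ^ k := one_le_pow₀ (by norm_num)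
      have hd : PySem.Int.truncdiv n 10 = n / 10 := Int.tdiv_eq_ediv_of_nonneg (by omega)
      have : PySem.Int.truncdiv n 10 < 10 ^ k := by
        rw [hd]; rw [pow_succ] at h; omega
      have := ih _ this
      omega
    · simp [h1]

-- ===== A reduced to goSpec =====
theorem aLoop_go : ∀ (ds : List Int) (n : Int), digitsFrom n = ds →
    ∀ (last : Int) (L : Nat) (b : Option Int),
    0 ≤ last → last < 10 → 1 ≤ L → L + ds.length ≤ 11 →
    aLoop n last (b.getD 0) b.isNone
        (if 2 ≤ L then some (List.replicate L (dchar last)) else none)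
      = ((goSpec ds last L b).getD 0, (goSpec ds last L b).isNone) := by
  intro ds
  induction ds with
  | nil =>
    intro n hn last L b _ _ _ _
    have hn1 : ¬ 1 ≤ n := by
      intro h; rw [digitsFrom, dif_pos h] at hn; simp at hn
    rw [aLoop, dif_neg hn1]
    rfl
  | cons d rest ih =>
    intro n hn last L b _ _ hL hlen
    have hn1 : 1 ≤ n := by
      by_contra h; rw [digitsFrom, dif_neg h] at hn; simp at hn
    rw [digitsFrom, dif_pos hn1] at hn
    injection hn with hd hrest
    have hd0 : 0 ≤ d := hd ▸ PySem.Int.mod_nonneg n (by norm_num)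
    have hd10 : d < 10 := hd ▸ PySem.Int.mod_lt n (by norm_num)
    have hlen' : L + 1 + rest.length ≤ 11 := by simp at hlen; omega
    rw [aLoop, dif_pos hn1]
    simp only [hd]
    by_cases hdl : d = last
    · subst hdl
      simp only [beq_self_eq_true, if_true]
      have hrep : (match (if 2 ≤ L then some (List.replicate L (dchar d)) else none) with
          | none => PySem.Int.toChars d | some s => s) ++ PySem.Int.toChars d
          = List.replicate (L + 1) (dchar d) := by
        rw [toChars_digit d hd0 hd10]
        by_cases h2 : 2 ≤ L
        · rw [if_pos h2]; exact List.replicate_succ'.symm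
        · have hL1 : L = 1 := by omega
          subst hL1; rw [if_neg h2]; rfl
      rw [hrep, ofChars_rep d hd0 hd10 (L + 1) (by omega) (by omega)]
      simp only [Option.getD_some]
      rw [goSpec, if_pos rfl]
      have hmax : max (b.getD 0) (repVal d (L + 1)) = (upd b (repVal d (L + 1))).getD 0 :=
        (upd_getD b _ (repVal_nonneg d hd0 (L + 1))).symm
      rw [hmax]
      have := ih (PySem.Int.truncdiv n 10) hrest d (L + 1) (upd b (repVal d (L + 1)))
        hd0 hd10 (by omega) hlen'
      rw [if_pos (by omega : 2 ≤ L + 1), upd_isSome] at this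
      exact this
    · simp only [show (d == last) = false from beq_eq_false_iff_ne.mpr hdl,
        Bool.false_eq_true, if_false]
      rw [goSpec, if_neg hdl]
      have := ih (PySem.Int.truncdiv n 10) hrest d 1 b hd0 hd10 le_rfl (by omega)
      rw [if_neg (by norm_num : ¬ (2 ≤ 1))] at this
      exact this

-- ===== B reduced to goSpec =====
theorem digitsLoopB_eq (m : Int) (acc : List Int) : digitsLoopB m acc = acc ++ digitsFrom m := by
  induction m, acc using digitsLoopB.induct with
  | case1 m acc h ih =>
    rw [digitsLoopB, digitsFrom]
    simp only [h, dif_pos]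
    rw [ih]
    simp
  | case2 m acc h => rw [digitsLoopB, digitsFrom]; simp [h]

theorem rleLoop_append : ∀ (ds : List Int) (runs rs : List (Int × Int)), rs ≠ [] →
    rleLoop ds (runs ++ rs) = runs ++ rleLoop ds rs := by
  intro ds
  induction ds with
  | nil => intro runs rs _; simp [rleLoop]
  | cons d rest ih =>
    intro runs rs h
    rw [rleLoop, rleLoop, List.getLast?_append_of_ne_nil runs h]
    cases hrs : rs.getLast? with
    | none => exact absurd (List.getLast?_eq_none_iff.mp hrs) h
    | some r =>
      by_cases hb : r.1 = d
      · simp only [hb, beq_self_eq_true, if_true, List.dropLast_append_of_ne_nil h,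
          List.append_assoc]
        exact ih runs (rs.dropLast ++ [(d, r.2 + 1)]) (by simp)
      · simp only [beq_eq_false_iff_ne.mpr hb, Bool.false_eq_true, if_false, List.append_assoc]
        exact ih runs (rs ++ [(d, 1)]) (by simp)

theorem bestLoop_append (xs ys : List (Int × Int)) (b : Option Int) :
    bestLoop (xs ++ ys) b = bestLoop ys (bestLoop xs b) := by
  induction xs generalizing b with
  | nil => simp [bestLoop]
  | cons x rest ih => cases x; simp only [List.cons_append, bestLoop]; rw [ih]

def flushB (b : Option Int) (d c : Int) : Option Int :=
  if 2 ≤ c then upd b (repVal d c.toNat) else b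

theorem bestLoop_single (d c : Int) (b : Option Int) :
    bestLoop [(d, c)] b = flushB b d c := by
  cases b <;> simp [bestLoop, flushB, upd, repVal]

theorem flushB_one (b : Option Int) (d : Int) : flushB b d 1 = b := by
  simp [flushB]

theorem flushB_step (b : Option Int) (d c : Int) (hc : 1 ≤ c) (hd : 0 ≤ d) :
    flushB b d (c + 1) = upd (flushB b d c) (repVal d (c.toNat + 1)) := by
  by_cases h2 : 2 ≤ c
  · have h1 : (c + 1).toNat = c.toNat + 1 := by omega
    rw [flushB, if_pos (by omega), flushB, if_pos h2, h1,
      upd_absorb _ _ _ (repVal_mono d hd c.toNat)]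
  · have hc1 : c = 1 := by omega
    subst hc1
    rw [flushB, if_pos (by norm_num), flushB, if_neg (by norm_num)]
    rfl

theorem B_go : ∀ (ds : List Int) (d0 c : Int) (best : Option Int), 1 ≤ c → 0 ≤ d0 →
    (∀ d ∈ ds, 0 ≤ d) →
    bestLoop (rleLoop ds [(d0, c)]) best = goSpec ds d0 c.toNat (flushB best d0 c) := by
  intro ds
  induction ds with
  | nil =>
    intro d0 c best _ _ _
    rw [rleLoop, bestLoop_single, goSpec]
  | cons d rest ih =>
    intro d0 c best hc hd0 hds
    rw [rleLoop]
    simp only [show ([(d0, c)] : List (Int × Int)).getLast? = some (d0, c) from rfl,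
      show ([(d0, c)] : List (Int × Int)).dropLast = [] from rfl, List.nil_append]
    by_cases hdd : d0 = d
    · subst hdd
      simp only [beq_self_eq_true, if_true]
      rw [ih d0 (c + 1) best (by omega) hd0 (fun x hx => hds x (List.mem_cons_of_mem _ hx)),
        goSpec, if_pos rfl, flushB_step best d0 c hc hd0]
      have h1 : (c + 1).toNat = c.toNat + 1 := by omega
      rw [h1]
    · simp only [show ((d0, c).1 == d) = false from beq_eq_false_iff_ne.mpr (fun h => hdd h),
        Bool.false_eq_true, if_false]
      rw [rleLoop_append rest [(d0, c)] [(d, 1)] (by simp), bestLoop_append,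
        bestLoop_single, goSpec, if_neg (fun h => hdd h.symm),
        ih d 1 (flushB best d0 c) le_rfl (hds d List.mem_cons_self)
          (fun x hx => hds x (List.mem_cons_of_mem _ hx)), flushB_one]
      rfl

-- ===== VERDICT (by name: the statement is the Claim_ definition above) =====
theorem max_num_made_of_repeats_spec : Claim_equal_max_num_made_of_repeats := by
  intro n hdom
  have hn : -2147483648 ≤ n ∧ n ≤ 2147483648 := by
    simpa [Dom_max_num_made_of_repeats, pvDomInt] using hdom
  unfold Spec_max_num_made_of_repeats
  simp only [max_num_made_of_repeats, max_num_made_of_repeats_alt]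
  have hm10 : PySem.Int.truncdiv n 10 < 10 ^ 10 := by
    unfold PySem.Int.truncdiv
    rcases (by omega : 0 ≤ n ∨ n < 0) with h | h
    · rw [Int.tdiv_eq_ediv_of_nonneg h]; omega
    · have h2 : n.tdiv 10 = -((-n).tdiv 10) := by
        rw [show n = -(-n) by ring, Int.neg_tdiv, neg_neg]
      rw [h2, Int.tdiv_eq_ediv_of_nonneg (by omega)]; omega
  have hlen : (digitsFrom (PySem.Int.truncdiv n 10)).length ≤ 10 :=
    digitsFrom_len 10 _ hm10
  have hA := aLoop_go (digitsFrom (PySem.Int.truncdiv n 10)) (PySem.Int.truncdiv n 10) rfl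
      (PySem.Int.mod n 10) 1 none (PySem.Int.mod_nonneg n (by norm_num))
      (PySem.Int.mod_lt n (by norm_num)) le_rfl (by omega)
  rw [if_neg (by norm_num : ¬ (2 ≤ 1))] at hA
  rw [digitsLoopB_eq, List.singleton_append, rleLoop]
  simp only [List.getLast?_nil, List.nil_append]
  rw [B_go (digitsFrom (PySem.Int.truncdiv n 10)) (PySem.Int.mod n 10) 1 none le_rfl
      (PySem.Int.mod_nonneg n (by norm_num))
      (fun d hd => (digitsFrom_mem _ d hd).1), flushB_one]
  rw [show ((1 : Int)).toNat = 1 from rfl]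
  rw [show ((none : Option Int).getD 0) = 0 from rfl, show (none : Option Int).isNone = true from rfl] at hA
  rw [hA]
  cases goSpec (digitsFrom (PySem.Int.truncdiv n 10)) (PySem.Int.mod n 10) 1 none <;> simp
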